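-- pv_equiv track=rewrite | github.com/TvT669/KnowledgeBase | app/services/sessions.py | _recent_segment
-- ===== SOURCE A (Python) =====
-- from typing import Any
--
-- def _recent_segment(messages: list[dict[str, Any]], max_messages: int = 8) -> list[dict[str, Any]]:
--     if len(messages) <= max_messages:
--         return messages
--
--     user_indices = [index for index, message in enumerate(messages) if message.get("role") == "user"]
--     if len(user_indices) >= 2:
--         start = user_indices[-2]
--         segment = messages[start:]
--         return segment[-max_messages:]
--
--     return messages[-max_messages:]
-- ===== SOURCE B (Python) =====
-- def _recent_segment(messages: list[dict[str, any]], max_messages: int = 8) -> list[dict[str, any]]: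
--     if len(messages) <= max_messages:
--         return messages
--     count = 0
--     for i in range(len(messages) - 1, -1, -1):
--         if messages[i].get("role") == "user":
--             count += 1
--             if count == 2:
--                 return messages[i:][-max_messages:]
--     return messages[-max_messages:]
-- ===== Notes on version B (the rewrite author's own statement) =====
-- stated objective: alternative
-- what changed: Instead of materialising the full list of all user-message indices and indexing it at [-2], B scans the messages backward with a counter and short-circuits as soon as the second user message from the end is found.
import Mathlib
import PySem

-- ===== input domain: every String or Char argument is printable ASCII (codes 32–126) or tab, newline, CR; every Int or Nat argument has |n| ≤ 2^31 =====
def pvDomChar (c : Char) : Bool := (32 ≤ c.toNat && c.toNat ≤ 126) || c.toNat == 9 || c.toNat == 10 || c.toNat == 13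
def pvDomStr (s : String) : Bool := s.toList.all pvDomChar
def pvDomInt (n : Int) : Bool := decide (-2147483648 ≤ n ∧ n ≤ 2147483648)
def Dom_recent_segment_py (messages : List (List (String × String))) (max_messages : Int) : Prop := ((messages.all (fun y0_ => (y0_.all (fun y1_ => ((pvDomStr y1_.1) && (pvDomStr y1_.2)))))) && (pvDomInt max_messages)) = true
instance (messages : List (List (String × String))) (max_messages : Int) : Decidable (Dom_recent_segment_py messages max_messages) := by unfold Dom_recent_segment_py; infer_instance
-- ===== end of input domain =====

-- B replaces A's full user-index table + [-2] lookup by a backward scan with a counter that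
-- short-circuits at the second user message from the end (objective: alternative).


-- ===== PORT A =====
-- message.get("role") == "user"
def pvIsUser (m : List (String × String)) : Bool :=
  (PySem.Dict.mk m).get? "role" == some "user"

def recent_segment_py (messages : List (List (String × String))) (max_messages : Int) : List (List (String × String)) :=
  if (messages.length : Int) ≤ max_messages then messages
  else
    let user_indices : List Int :=
      ((PySem.List.enumerate messages).filter (fun p => pvIsUser p.2)).map (·.1)
    if 2 ≤ user_indices.length then
      -- user_indices[-2]: exact, the guard guarantees length ≥ 2 so pyGet? is some
      let start : Int := (PySem.List.pyGet? user_indices (-2)).getD 0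
      let segment := PySem.List.slice messages (some start) none
      PySem.List.slice segment (some (-max_messages)) none
    else
      PySem.List.slice messages (some (-max_messages)) none

-- ===== PORT B =====
-- backward scan: k counts down (current index is k-1), count = user messages seen so far
def pvScanBack (messages : List (List (String × String))) (max_messages : Int) : Nat → Nat → List (List (String × String))
  | 0, _ => PySem.List.slice messages (some (-max_messages)) none
  | k + 1, count =>
    -- messages[k]: exact, k < messages.length on every call
    if pvIsUser ((PySem.List.pyGet? messages (k : Int)).getD []) then
      if count + 1 == 2 then
        PySem.List.slice (PySem.List.slice messages (some (k : Int)) none) (some (-max_messages)) none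
      else pvScanBack messages max_messages k (count + 1)
    else pvScanBack messages max_messages k count

def recent_segment_py_alt (messages : List (List (String × String))) (max_messages : Int) : List (List (String × String)) :=
  if (messages.length : Int) ≤ max_messages then messages
  else pvScanBack messages max_messages messages.length 0

-- ===== PRECONDITION & SPEC =====
def Spec_recent_segment_py (messages : List (List (String × String))) (max_messages : Int) (out : List (List (String × String))) : Prop := out = recent_segment_py_alt messages max_messages
instance (messages : List (List (String × String))) (max_messages : Int) (out : List (List (String × String))) : Decidable (Spec_recent_segment_py messages max_messages out) := by unfold Spec_recent_segment_py; infer_instance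

-- ===== CLAIM (what is proved, stated in full; the proofs are below) =====
def Claim_equal_recent_segment_py : Prop := ∀ (messages : List (List (String × String))) (max_messages : Int), Dom_recent_segment_py messages max_messages → Spec_recent_segment_py messages max_messages (recent_segment_py messages max_messages)

-- ===== LEMMAS AND PROOFS =====

-- the user indices below k, in increasing order
def pvR (messages : List (List (String × String))) (k : Nat) : List Nat :=
  (List.range k).filter (fun i => pvIsUser (messages[i]?.getD []))

-- the final slice A and B both take once a start index i is chosen
def pvS (messages : List (List (String × String))) (max_messages : Int) (i : Nat) : List (List (String × String)) :=
  PySem.List.slice (PySem.List.slice messages (some (i : Int)) none) (some (-max_messages)) none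

def pvT (messages : List (List (String × String))) (max_messages : Int) : List (List (String × String)) :=
  PySem.List.slice messages (some (-max_messages)) none

lemma pvR_succ (messages : List (List (String × String))) (k : Nat) :
    pvR messages (k + 1) = pvR messages k ++ (if pvIsUser (messages[k]?.getD []) then [k] else []) := by
  simp [pvR, List.range_succ, List.filter_append, List.filter_cons]

-- backward-scan characterisation: count 1 tracks the last user index, count 0 the second-to-last
lemma pvScanBack_char (messages : List (List (String × String))) (max_messages : Int) (k : Nat) :
    (pvScanBack messages max_messages k 1 =
      (match (pvR messages k).getLast? with
       | some i => pvS messages max_messages i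
       | none => pvT messages max_messages)) ∧
    (pvScanBack messages max_messages k 0 =
      (match (pvR messages k).dropLast.getLast? with
       | some i => pvS messages max_messages i
       | none => pvT messages max_messages)) := by
  induction k with
  | zero => simp [pvScanBack, pvR, pvT]
  | succ k ih =>
    rw [pvR_succ]
    simp only [pvScanBack, PySem.List.pyGet?_natCast]
    by_cases h : pvIsUser (messages[k]?.getD []) = true
    · simp only [h, if_true]
      refine ⟨?_, ?_⟩
      · rw [List.getLast?_concat]
        simp [pvS]
      · rw [if_neg (by decide), List.dropLast_concat, ih.1]
    · simp only [h, Bool.false_eq_true, if_false, List.append_nil]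
      exact ih
-- A's user_indices list is pvR over the whole list, cast to Int
lemma pvUI_eq (messages : List (List (String × String))) :
    ((PySem.List.enumerate messages).filter (fun p => pvIsUser p.2)).map (·.1)
      = (pvR messages messages.length).map (fun i : Nat => (i : Int)) := by
  rw [PySem.List.enumerate_eq_map_pyRange messages ([] : List (String × String)),
      PySem.List.pyRange_one, List.map_map, List.filter_map, List.map_map]
  unfold pvR
  rw [show ((PySem.List.len messages : Int) - 0).toNat = messages.length by
        simp [PySem.List.len_eq]]
  rw [List.filter_congr (q := fun i => pvIsUser (messages[i]?.getD [])) ?_]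
  · simp [Function.comp_def]
  · intro i hi
    simp only [Function.comp_def, zero_add]
    rw [PySem.List.pyGetD_natCast, List.getD]

lemma dropLast_getLast?_of_le (l : List Nat) (h : 2 ≤ l.length) :
    l.dropLast.getLast? = l[l.length - 2]? := by
  rw [List.getLast?_eq_getElem?, List.getElem?_dropLast, List.length_dropLast]
  rw [if_pos (by omega)]
  congr 1

lemma dropLast_getLast?_of_lt (l : List Nat) (h : l.length < 2) :
    l.dropLast.getLast? = none := by
  rw [List.getLast?_eq_getElem?, List.getElem?_dropLast, List.length_dropLast]
  rw [if_neg (by omega)]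

-- ===== VERDICT (by name: the statement is the Claim_ definition above) =====
theorem recent_segment_py_spec : Claim_equal_recent_segment_py := by
  intro messages max_messages _
  unfold Spec_recent_segment_py recent_segment_py recent_segment_py_alt
  by_cases hguard : (messages.length : Int) ≤ max_messages
  · simp [hguard]
  · rw [if_neg hguard, if_neg hguard]
    rw [(pvScanBack_char messages max_messages messages.length).2]
    simp only [pvUI_eq, List.length_map]
    by_cases hlen : 2 ≤ (pvR messages messages.length).length
    · rw [if_pos hlen]
      rw [dropLast_getLast?_of_le _ hlen]
      rw [PySem.List.pyGet?_neg_ofNat _ 2 (by decide) (by simpa using hlen)]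
      have hidx : (pvR messages messages.length).length - 2 < (pvR messages messages.length).length := by omega
      simp [List.getElem?_map, List.getElem?_eq_getElem hidx, pvS]
    · rw [if_neg hlen]
      rw [dropLast_getLast?_of_lt _ (by omega)]
      rfl
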